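-- pv_equiv track=rewrite | github.com/TuiTenVan/Python_CODE_PTIT | ICPC0114.py | check
-- ===== SOURCE A (Python) =====
-- import math
--
-- def snt(x):
--     if x < 2:
--         return False
--     for i in range(2, int(math.sqrt(x)) + 1):
--         if x % i == 0:
--             return False
--     return True
--
-- def check(x):
--     m = x
--     dao = 0
--     while m > 0:
--         dao = dao * 10 + m % 10
--         m //= 10
--     if(snt(dao)):
--         return True
--     else:
--         return False
-- ===== SOURCE B (Python) =====
-- def _coprime_to_smaller_primes(primes, n):
--     # primes is the increasing list of all primes below n
--     for p in primes:
--         if p * p > n: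
--             break
--         if n % p == 0:
--             return False
--     return True
--
-- def check(x):
--     # reversed-digits primality: string-based reversal, then trial division of the
--     # reversal by PRIMES only, using an incrementally maintained ordered prime list
--     if x <= 0:
--         return False
--     rev = 0
--     for c in reversed(str(x)):
--         rev = rev * 10 + (ord(c) - 48)
--     if rev < 2:
--         return False
--     primes = []
--     n = 2
--     while n * n <= rev:
--         if _coprime_to_smaller_primes(primes, n):
--             if rev % n == 0:
--                 return False
--             primes.append(n)
--         n += 1
--     return True
-- ===== Notes on version B (the rewrite author's own statement) =====
-- stated objective: alternative
-- what changed: B reverses the digits by folding over the reversed decimal string instead of A's %10///10 loop, and replaces A's trial division of the reversal by every integer up to isqrt with a single upward sweep that incrementally maintains the ordered list of primes found so far (each candidate is certified prime against that list, stopping at p*p>n) and divides the reversal only by those primes.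
import Mathlib
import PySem

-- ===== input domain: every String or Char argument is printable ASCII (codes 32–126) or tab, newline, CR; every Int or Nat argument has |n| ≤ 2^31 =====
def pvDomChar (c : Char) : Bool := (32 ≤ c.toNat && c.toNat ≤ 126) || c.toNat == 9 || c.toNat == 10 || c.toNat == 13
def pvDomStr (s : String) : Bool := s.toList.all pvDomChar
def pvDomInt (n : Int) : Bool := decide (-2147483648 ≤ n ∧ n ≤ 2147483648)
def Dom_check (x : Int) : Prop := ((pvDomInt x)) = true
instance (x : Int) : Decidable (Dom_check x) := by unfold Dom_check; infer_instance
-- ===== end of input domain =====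

-- B re-implements check (is the digit-reversal of x prime?) with a string-based reversal
-- (fold over reversed(str(x))) and a single upward sweep that maintains the ordered list of
-- primes found so far, dividing the reversal only by those primes, instead of A's arithmetic
-- reversal loop and trial division by every integer up to isqrt; objective: alternative.


-- ===== PORT A =====
-- snt(x): trial division; `int(math.sqrt(x))` is ported as `Nat.sqrt x.toNat`, which is exact
-- on every value reached here (x ≤ 8463847413 < 2^52, where CPython's correctly rounded float
-- sqrt truncates to the integer square root); the `for`-loop with early `return False` is the
-- conjunction over the range.
def snt (x : Int) : Bool :=
  if x < 2 then false
  else (PySem.List.pyRange 2 ((Nat.sqrt x.toNat : Int) + 1) 1).all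
        (fun i => !(PySem.Int.mod x i == 0))

-- the `while m > 0: dao = dao*10 + m%10; m //= 10` loop of A
def revLoop (m dao : Int) : Int :=
  if 0 < m then revLoop (PySem.Int.floordiv m 10) (dao * 10 + PySem.Int.mod m 10) else dao
termination_by m.toNat
decreasing_by
  rw [PySem.Int.floordiv_eq_ediv_of_pos (by norm_num)]
  omega

def check (x : Int) : Bool :=
  let dao := revLoop x 0
  if snt dao then true else false

-- ===== PORT B =====
-- _coprime_to_smaller_primes(primes, n): the `for p in primes: if p*p>n: break; …` scan
def trialList (primes : List Int) (n : Int) : Bool :=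
  match primes with
  | [] => true
  | p :: ps =>
    if n < p * p then true
    else if PySem.Int.mod n p == 0 then false
    else trialList ps n

-- the `while n*n <= rev` sweep of Source B, carrying the growing prime list
def bLoop (rev : Int) (primes : List Int) (n : Int) : Bool :=
  if n * n ≤ rev then
    if trialList primes n then
      if PySem.Int.mod rev n == 0 then false
      else bLoop rev (primes ++ [n]) (n + 1)
    else bLoop rev primes (n + 1)
  else true
termination_by (rev + 1 - n).toNat
decreasing_by
  all_goals
    have h2 : n ≤ 0 ∨ n ≤ n * n := by
      by_cases h' : n ≤ 0
      · exact Or.inl h'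
      · exact Or.inr (le_mul_of_one_le_left (by omega) (by omega))
    have h0 : 0 ≤ n * n := mul_self_nonneg n
    omega

-- `reversed(str(x))` is exactly the reversed character list of str(x); `ord c` is c.toNat
def check_alt (x : Int) : Bool :=
  if x ≤ 0 then false
  else
    let rev := ((PySem.Int.toChars x).reverse).foldl
                 (fun a c => a * 10 + ((c.toNat : Int) - 48)) 0
    if rev < 2 then false
    else bLoop rev [] 2

-- ===== PRECONDITION & SPEC =====
def Spec_check (x : Int) (out : Bool) : Prop := out = check_alt x
instance (x : Int) (out : Bool) : Decidable (Spec_check x out) := by unfold Spec_check; infer_instance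

-- ===== CLAIM (what is proved, stated in full; the proofs are below) =====
def Claim_equal_check : Prop := ∀ (x : Int), Dom_check x → Spec_check x (check x)

-- ===== LEMMAS AND PROOFS =====

-- Core's fuelled toDigitsCore, with enough fuel, lists the base-10 digits most significant first.
lemma toDigitsCore_eq_digits (f : Nat) : ∀ (n : Nat) (acc : List Char), n < f → 0 < n →
    Nat.toDigitsCore 10 f n acc = ((Nat.digits 10 n).map Nat.digitChar).reverse ++ acc := by
  induction f with
  | zero => intro n acc h; omega
  | succ f ih =>
    intro n acc hf hn
    rw [Nat.digits_def' (by norm_num) hn]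
    simp only [Nat.toDigitsCore]
    by_cases h0 : n / 10 = 0
    · simp [h0]
    · have hlt : n / 10 < f := by omega
      rw [if_neg h0, ih (n / 10) _ hlt (by omega)]
      simp

lemma toChars_pos (x : Int) (hx : 0 < x) :
    PySem.Int.toChars x = ((Nat.digits 10 x.toNat).map Nat.digitChar).reverse := by
  have hx' : ¬ x < 0 := by omega
  simp only [PySem.Int.toChars, if_neg hx', Nat.toDigits]
  rw [toDigitsCore_eq_digits (x.toNat + 1) x.toNat [] (by omega) (by omega)]
  simp

lemma digitChar_val (d : Nat) (hd : d < 10) : ((Nat.digitChar d).toNat : Int) - 48 = (d : Int) := by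
  interval_cases d <;> decide

-- A's while-loop is the left fold of the accumulator step over the digits (least significant first).
lemma revLoop_eq (m acc : Int) :
    revLoop m acc = (Nat.digits 10 m.toNat).foldl (fun (a : Int) (d : Nat) => a * 10 + (d : Int)) acc := by
  induction m, acc using revLoop.induct with
  | case1 m acc hm ih =>
    rw [revLoop, if_pos hm]
    have hfd : PySem.Int.floordiv m 10 = m / 10 := PySem.Int.floordiv_eq_ediv_of_pos (by norm_num)
    have hmd : PySem.Int.mod m 10 = m % 10 := PySem.Int.mod_eq_emod_of_pos (by norm_num)
    rw [hfd, hmd] at ih ⊢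
    rw [ih]
    have h1 : (m / 10).toNat = m.toNat / 10 := by omega
    have h2 : m % 10 = ((m.toNat % 10 : Nat) : Int) := by omega
    rw [Nat.digits_def' (b := 10) (by norm_num) (n := m.toNat) (by omega)]
    simp [h1, h2]
  | case2 m acc hm =>
    rw [revLoop, if_neg hm]
    have : m.toNat = 0 := by omega
    simp [this]

-- B's fold over the reversed decimal string computes the same fold over the digits.
lemma rev_fold_eq (x : Int) (hx : 0 < x) :
    ((PySem.Int.toChars x).reverse).foldl (fun a c => a * 10 + ((c.toNat : Int) - 48)) 0
      = (Nat.digits 10 x.toNat).foldl (fun (a : Int) (d : Nat) => a * 10 + (d : Int)) 0 := by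
  rw [toChars_pos x hx, List.reverse_reverse, List.foldl_map]
  exact PySem.List.foldl_congr_mem _ _ _ 0
    (fun acc d hd => by rw [digitChar_val d (Nat.digits_lt_base (by norm_num) hd)])

lemma digits_fold_nonneg (l : List Nat) : ∀ (acc : Int), 0 ≤ acc →
    0 ≤ l.foldl (fun (a : Int) (d : Nat) => a * 10 + (d : Int)) acc := by
  induction l with
  | nil => intro acc h; simpa using h
  | cons d l ih => intro acc h; exact ih _ (by positivity)

-- A's primality test returns true exactly on primes (for nonnegative input).
lemma snt_iff (n : Int) (h0 : 0 ≤ n) : snt n = true ↔ Nat.Prime n.toNat := by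
  unfold snt
  by_cases h2 : n < 2
  · simp only [if_pos h2]
    constructor
    · intro h; exact absurd h (by simp)
    · intro hp; exact absurd hp.two_le (by omega)
  · simp only [if_neg h2, List.all_eq_true]
    rw [Nat.prime_def_le_sqrt]
    constructor
    · intro h
      refine ⟨by omega, fun m h2m hms hdvd => ?_⟩
      have hmem : (m : Int) ∈ PySem.List.pyRange 2 ((Nat.sqrt n.toNat : Int) + 1) 1 := by
        rw [PySem.List.mem_pyRange_one]
        constructor <;> [exact_mod_cast h2m; exact_mod_cast (by omega : (m:Int) < (Nat.sqrt n.toNat : Int) + 1)]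
      have := h _ hmem
      simp only [Bool.not_eq_eq_eq_not, Bool.not_true, beq_eq_false_iff_ne, ne_eq,
        PySem.Int.mod_eq_zero_iff_dvd] at this
      exact this (by rw [show n = (n.toNat : Int) by omega]; exact_mod_cast hdvd)
    · rintro ⟨hn2, h⟩ i hi
      rw [PySem.List.mem_pyRange_one] at hi
      have hi0 : 0 ≤ i := by omega
      have hdvd : ¬ i ∣ n := by
        intro hdvd
        refine h i.toNat (by omega) (by omega) ?_
        have : (i.toNat : Int) ∣ ((n.toNat : Int)) := by
          rw [show ((i.toNat : Int)) = i by omega, show ((n.toNat : Int)) = n by omega]; exact hdvd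
        exact_mod_cast this
      simp only [Bool.not_eq_eq_eq_not, Bool.not_true, beq_eq_false_iff_ne, ne_eq,
        PySem.Int.mod_eq_zero_iff_dvd]
      exact hdvd

-- a prime has no proper divisor
lemma prime_no_div (n d : Int) (hp : Nat.Prime n.toNat) (h1 : 1 < d) (h2 : d < n) : ¬ d ∣ n := by
  intro hd
  have hn2 := hp.two_le
  have hn : n = (n.toNat : Int) := by omega
  have hdn : (d.toNat : Int) ∣ (n.toNat : Int) := by
    rw [Int.toNat_of_nonneg (by omega : (0:Int) ≤ d), ← hn]; exact hd
  rcases Nat.Prime.eq_one_or_self_of_dvd hp _ (Int.natCast_dvd_natCast.mp hdn) with h | h <;> omega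

-- the break-at-p*p>n scan over an increasing list of numbers ≥ 2 checks exactly the
-- divisibility of n by the listed p with p*p ≤ n
lemma trialList_iff (n : Int) : ∀ (L : List Int), L.Pairwise (· < ·) → (∀ p ∈ L, 2 ≤ p) →
    (trialList L n = true ↔ ∀ p ∈ L, p * p ≤ n → ¬ p ∣ n) := by
  intro L
  induction L with
  | nil => intro _ _; simp [trialList]
  | cons p ps ih =>
    intro hpw h2
    have hlt : ∀ q ∈ ps, p < q := fun q hq => (List.pairwise_cons.mp hpw).1 q hq
    have hp2 : 2 ≤ p := h2 p (List.mem_cons_self ..)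
    unfold trialList
    by_cases hbr : n < p * p
    · rw [if_pos hbr]
      constructor
      · intro _ q hq hqq
        rcases List.mem_cons.mp hq with rfl | hq'
        · omega
        · exfalso
          have hq2 := hlt q hq'
          nlinarith
      · intro _; rfl
    · rw [if_neg hbr]
      by_cases hdv : PySem.Int.mod n p == 0
      · rw [if_pos hdv]
        simp only [beq_iff_eq, PySem.Int.mod_eq_zero_iff_dvd] at hdv
        constructor
        · intro h; exact absurd h (by simp)
        · intro h
          exact absurd hdv (h p (List.mem_cons_self ..) (by omega))
      · rw [if_neg hdv]
        simp only [beq_iff_eq, PySem.Int.mod_eq_zero_iff_dvd] at hdv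
        rw [ih (List.pairwise_cons.mp hpw).2 (fun q hq => h2 q (List.mem_cons_of_mem _ hq))]
        constructor
        · intro h q hq hqq
          rcases List.mem_cons.mp hq with rfl | hq'
          · exact hdv
          · exact h q hq' hqq
        · intro h q hq hqq
          exact h q (List.mem_cons_of_mem _ hq) hqq

-- n ≥ 2 is prime iff no prime p with p*p ≤ n and p < n divides it
lemma prime_test_iff (n : Int) (hn : 2 ≤ n) :
    (∀ p : Int, 2 ≤ p → p < n → p * p ≤ n → Nat.Prime p.toNat → ¬ p ∣ n) ↔ Nat.Prime n.toNat := by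
  constructor
  · intro h
    by_contra hnp
    set p := n.toNat.minFac with hpdef
    have hppr : p.Prime := Nat.minFac_prime (by omega)
    have hpd : p ∣ n.toNat := Nat.minFac_dvd _
    have hpsq : p * p ≤ n.toNat := by
      have := Nat.minFac_sq_le_self (n := n.toNat) (by omega) hnp
      nlinarith [this, sq p]
    have hp2 := hppr.two_le
    have hpn : p < n.toNat := by nlinarith
    have hsq' : ((p * p : Nat) : Int) ≤ (n.toNat : Int) := by exact_mod_cast hpsq
    push_cast at hsq'
    refine h p (by exact_mod_cast hp2) (by omega) (by omega) (by simpa using hppr) ?_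
    have : (p : Int) ∣ (n.toNat : Int) := by exact_mod_cast hpd
    rwa [show ((n.toNat : Int)) = n by omega] at this
  · intro hp q h2q hqn _ _
    exact prime_no_div n q hp (by omega) hqn

-- invariant of Source B's main sweep: the carried list is exactly the increasing list of primes
-- below n, none of which divides rev; the loop returns true iff no prime q ≥ n with q*q ≤ rev
-- divides rev
lemma bLoop_iff (rev : Int) : ∀ (L : List Int) (n : Int), 2 ≤ n →
    (∀ p, p ∈ L ↔ 2 ≤ p ∧ p < n ∧ Nat.Prime p.toNat) → L.Pairwise (· < ·) →
    (∀ p ∈ L, ¬ p ∣ rev) →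
    (bLoop rev L n = true ↔
      ∀ q : Int, n ≤ q → q * q ≤ rev → Nat.Prime q.toNat → ¬ q ∣ rev) := by
  intro L n
  induction L, n using bLoop.induct (rev := rev) with
  | case4 L n hstop =>
    intro hn2 _ _ _
    rw [bLoop, if_neg hstop]
    simp only [true_iff]
    intro q hq hqq _ _
    nlinarith
  | case1 L n hgo htr hdv =>
    intro hn2 hmem hpw hndvd
    rw [bLoop, if_pos hgo, if_pos htr, if_pos hdv]
    simp only [beq_iff_eq, PySem.Int.mod_eq_zero_iff_dvd] at hdv
    have hl2 : ∀ p ∈ L, 2 ≤ p := fun p hp => ((hmem p).mp hp).1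
    have hnp : Nat.Prime n.toNat := by
      rw [← prime_test_iff n hn2]
      intro p h2p hpn hpp hppr
      exact (trialList_iff n L hpw hl2).mp htr p ((hmem p).mpr ⟨h2p, hpn, hppr⟩) hpp
    constructor
    · intro h; exact absurd h (by simp)
    · intro h; exact absurd hdv (h n le_rfl hgo hnp)
  | case2 L n hgo htr hdv ih =>
    intro hn2 hmem hpw hndvd
    rw [bLoop, if_pos hgo, if_pos htr, if_neg hdv]
    simp only [beq_iff_eq, PySem.Int.mod_eq_zero_iff_dvd] at hdv
    have hl2 : ∀ p ∈ L, 2 ≤ p := fun p hp => ((hmem p).mp hp).1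
    have hltn : ∀ p ∈ L, p < n := fun p hp => ((hmem p).mp hp).2.1
    have hnp : Nat.Prime n.toNat := by
      rw [← prime_test_iff n hn2]
      intro p h2p hpn hpp hppr
      exact (trialList_iff n L hpw hl2).mp htr p ((hmem p).mpr ⟨h2p, hpn, hppr⟩) hpp
    rw [ih (by omega)
      (fun p => by
        simp only [List.mem_append, List.mem_singleton, hmem p]
        constructor
        · rintro (⟨h1, h2, h3⟩ | rfl)
          · exact ⟨h1, by omega, h3⟩
          · exact ⟨hn2, by omega, hnp⟩
        · rintro ⟨h1, h2, h3⟩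
          by_cases hpn : p = n
          · exact Or.inr hpn
          · exact Or.inl ⟨h1, by omega, h3⟩)
      (List.pairwise_append.mpr ⟨hpw, List.pairwise_singleton _ _,
        fun a ha b hb => by rw [List.mem_singleton] at hb; subst hb; exact hltn a ha⟩)
      (fun p hp => by
        rcases List.mem_append.mp hp with h | h
        · exact hndvd p h
        · rw [List.mem_singleton] at h; subst h; exact hdv)]
    constructor
    · intro h q hq hqq hqpr
      rcases eq_or_lt_of_le hq with rfl | hlt
      · exact hdv
      · exact h q (by omega) hqq hqpr
    · intro h q hq hqq hqpr
      exact h q (by omega) hqq hqpr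
  | case3 L n hgo htr ih =>
    intro hn2 hmem hpw hndvd
    rw [bLoop, if_pos hgo, if_neg htr]
    have hl2 : ∀ p ∈ L, 2 ≤ p := fun p hp => ((hmem p).mp hp).1
    have hnnp : ¬ Nat.Prime n.toNat := by
      intro hnp
      apply htr
      rw [trialList_iff n L hpw hl2]
      intro p hp hpp
      have := (hmem p).mp hp
      exact prime_no_div n p hnp (by omega) (by omega)
    rw [ih (by omega)
      (fun p => by
        rw [hmem p]
        constructor
        · rintro ⟨h1, h2, h3⟩; exact ⟨h1, by omega, h3⟩
        · rintro ⟨h1, h2, h3⟩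
          refine ⟨h1, ?_, h3⟩
          rcases (by omega : p < n ∨ p = n) with h | rfl
          · exact h
          · exact absurd h3 hnnp)
      hpw hndvd]
    constructor
    · intro h q hq hqq hqpr
      rcases eq_or_lt_of_le hq with rfl | hlt
      · exact absurd hqpr hnnp
      · exact h q (by omega) hqq hqpr
    · intro h q hq hqq hqpr
      exact h q (by omega) hqq hqpr

-- B's primality sweep returns true exactly on primes (for nonnegative input).
lemma sweep_iff (r : Int) (h0 : 0 ≤ r) :
    (if r < 2 then false else bLoop r [] 2) = true ↔ Nat.Prime r.toNat := by
  by_cases h2 : r < 2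
  · simp only [if_pos h2]
    constructor
    · intro h; exact absurd h (by simp)
    · intro hp; exact absurd hp.two_le (by omega)
  · rw [if_neg h2]
    rw [bLoop_iff r [] 2 (by norm_num) (fun p => by simp; omega) List.Pairwise.nil
      (by simp)]
    constructor
    · intro h
      rw [← prime_test_iff r (by omega)]
      intro p h2p hpn hpp hppr
      exact h p h2p hpp hppr
    · intro hp q h2q hqq hqpr hdvd
      have hqr : q < r := by nlinarith
      exact prime_no_div r q hp (by omega) hqr hdvd

-- ===== VERDICT (by name: the statement is the Claim_ definition above) =====
theorem check_spec : Claim_equal_check := by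
  intro x _
  unfold Spec_check check check_alt
  by_cases hx : x ≤ 0
  · have hrev : revLoop x 0 = 0 := by rw [revLoop, if_neg (by omega)]
    rw [if_pos hx, hrev]
    decide
  · rw [if_neg hx]
    replace hx : 0 < x := by omega
    have hrev : ((PySem.Int.toChars x).reverse).foldl
        (fun a c => a * 10 + ((c.toNat : Int) - 48)) 0 = revLoop x 0 := by
      rw [rev_fold_eq x hx, revLoop_eq]
    simp only [hrev]
    set r := revLoop x 0 with hr
    have hr0 : 0 ≤ r := by
      rw [hr, revLoop_eq]
      exact digits_fold_nonneg _ 0 le_rfl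
    have h1 := snt_iff r hr0
    have h2 := sweep_iff r hr0
    rw [Bool.eq_iff_iff]
    constructor
    · intro h
      by_cases hs : snt r = true
      · exact h2.mpr (h1.mp hs)
      · rw [if_neg hs] at h; exact absurd h (by simp)
    · intro h
      rw [if_pos (h1.mpr (h2.mp h))]
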